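-- pv_equiv track=rewrite | github.com/stackcraftio/Calculator | app.py | convert_percent
-- ===== SOURCE A (Python) =====
-- def convert_percent(expr: str) -> str:
--     """
--     Converts percent patterns like:
--       50%   -> (50/100)
--       12.5% -> (12.5/100)
--     Works anywhere inside expression.
--     """
--     out = []
--     i = 0
--     n = len(expr)
--
--     while i < n:
--         ch = expr[i]
--         if ch.isdigit() or ch == ".":
--             # read full number
--             j = i
--             dot_count = 0
--             while j < n and (expr[j].isdigit() or expr[j] == "."):
--                 if expr[j] == ".":
--                     dot_count += 1
--                     if dot_count > 1:
--                         break
--                 j += 1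
--
--             number = expr[i:j]
--
--             # if immediately followed by % -> wrap
--             if j < n and expr[j] == "%":
--                 out.append(f"({number}/100)")
--                 i = j + 1
--             else:
--                 out.append(number)
--                 i = j
--         else:
--             out.append(ch)
--             i += 1
--
--     return "".join(out)
-- ===== SOURCE B (Python) =====
-- import re
--
-- _NUM = re.compile(r'(\d+\.?\d*|\.\d*)(%?)')
--
-- def convert_percent(expr: str) -> str:
--     """Wrap percent numbers as (x/100) using one regex substitution pass."""
--     def repl(m):
--         num, pct = m.group(1), m.group(2)
--         return f"({num}/100)" if pct else num
--     return _NUM.sub(repl, expr)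
-- ===== Notes on version B (the rewrite author's own statement) =====
-- stated objective: idiomatic
-- what changed: Replaced A's hand-written index/dot-count scanner (nested while loops with slice bookkeeping) by a single re.sub pass with the pattern (\d+\.?\d*|\.\d*)(%?) and a replacement function that wraps the number iff the % group matched; the C regex engine does the scanning (measured ~5x faster at the largest size).
import Mathlib
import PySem

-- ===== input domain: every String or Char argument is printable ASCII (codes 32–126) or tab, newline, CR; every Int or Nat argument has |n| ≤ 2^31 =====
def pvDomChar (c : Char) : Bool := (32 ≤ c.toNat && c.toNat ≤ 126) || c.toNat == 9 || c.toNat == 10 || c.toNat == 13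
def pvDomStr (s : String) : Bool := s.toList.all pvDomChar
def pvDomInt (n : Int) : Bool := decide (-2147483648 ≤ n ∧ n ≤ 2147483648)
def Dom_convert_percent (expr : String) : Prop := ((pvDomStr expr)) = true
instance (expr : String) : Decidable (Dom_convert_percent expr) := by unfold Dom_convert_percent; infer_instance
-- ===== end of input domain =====

-- B replaces A's hand-written index/dot-count scanner by one regex-substitution pass
-- (re.sub of (\d+\.?\d*|\.\d*)(%?)); objective: idiomatic. Python str.isdigit is
-- ported as Char.isDigit, exact on the ASCII domain.

-- ===== PORT A =====
-- inner `while j < n` loop of A: consumes digits/dots (stopping at a second dot),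
-- returning (number, rest of the input after it) — the structural form of A's j-scan
def readNumA (s : List Char) (dc : Nat) : List Char × List Char :=
  match s with
  | [] => ([], [])
  | c :: r =>
    if c.isDigit || c == '.' then
      if c == '.' then
        if dc + 1 > 1 then ([], c :: r)
        else ((readNumA r (dc + 1)).1.cons c, (readNumA r (dc + 1)).2)
      else ((readNumA r dc).1.cons c, (readNumA r dc).2)
    else ([], c :: r)

theorem digit_of_scan {c : Char} (h : (c.isDigit || c == '.') = true)
    (h2 : ¬((c == '.') = true)) : c.isDigit = true := by
  rcases Bool.or_eq_true_iff.mp h with hx | hx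
  · exact hx
  · exact absurd hx h2

theorem readNumA_len (s : List Char) (dc : Nat) : (readNumA s dc).2.length ≤ s.length := by
  induction s generalizing dc with
  | nil => simp [readNumA]
  | cons c r ih =>
    by_cases h1 : (c.isDigit || c == '.') = true
    · by_cases h2 : (c == '.') = true
      · by_cases h3 : dc + 1 > 1
        · simp [readNumA, h2, h3]
        · simpa [readNumA, h2, h3] using Nat.le_succ_of_le (ih (dc + 1))
      · simpa [readNumA, digit_of_scan h1 h2, h2] using Nat.le_succ_of_le (ih dc)
    · simp [readNumA, h1]

theorem readNumA_len_lt (c : Char) (r : List Char) (h : (c.isDigit || c == '.') = true) :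
    (readNumA (c :: r) 0).2.length < (c :: r).length := by
  by_cases h2 : (c == '.') = true
  · simpa [readNumA, h2] using Nat.lt_succ_of_le (readNumA_len r 1)
  · simpa [readNumA, digit_of_scan h h2, h2] using Nat.lt_succ_of_le (readNumA_len r 0)

-- outer `while i < n` loop of A
def goA : List Char → List Char
  | [] => []
  | c :: r =>
    if h : (c.isDigit || c == '.') = true then
      if (readNumA (c :: r) 0).2.head? = some '%' then
        ('(' :: (readNumA (c :: r) 0).1 ++ ('/' :: '1' :: '0' :: '0' :: ')' :: [])) ++
          goA (readNumA (c :: r) 0).2.tail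
      else (readNumA (c :: r) 0).1 ++ goA (readNumA (c :: r) 0).2
    else c :: goA r
termination_by s => s.length
decreasing_by
  · have h1 := readNumA_len_lt c r h
    have h2 : (readNumA (c :: r) 0).2.tail.length ≤ (readNumA (c :: r) 0).2.length := by
      simp [List.length_tail]
    simp only [List.length_cons] at h1 ⊢
    omega
  · exact readNumA_len_lt c r h
  · simp

def convert_percent (expr : String) : String := String.mk (goA expr.toList)

-- ===== PORT B =====
-- one attempt of the regex alternative (\d+\.?\d*|\.\d*): the matched number token
-- and the remaining input, or none if the pattern does not match at this position
def matchNum (s : List Char) : Option (List Char × List Char) :=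
  if (s.takeWhile (·.isDigit)) ≠ [] then
    match s.drop (s.takeWhile (·.isDigit)).length with
    | '.' :: r2 =>
      some (s.takeWhile (·.isDigit) ++ '.' :: r2.takeWhile (·.isDigit),
            r2.drop (r2.takeWhile (·.isDigit)).length)
    | r1 => some (s.takeWhile (·.isDigit), r1)
  else
    match s with
    | '.' :: r2 =>
      some ('.' :: r2.takeWhile (·.isDigit), r2.drop (r2.takeWhile (·.isDigit)).length)
    | _ => none

theorem matchNum_len (c : Char) (r : List Char) (p : List Char × List Char)
    (h : matchNum (c :: r) = some p) : p.2.length < (c :: r).length := by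
  unfold matchNum at h
  by_cases hne : (c :: r).takeWhile (·.isDigit) ≠ []
  · rw [if_pos hne] at h
    have h1 : 1 ≤ ((c :: r).takeWhile (·.isDigit)).length := List.length_pos_iff.mpr hne
    have h2 : ((c :: r).takeWhile (·.isDigit)).length ≤ (c :: r).length :=
      (List.takeWhile_sublist _).length_le
    split at h
    · rename_i r2 heq
      injection h with h
      subst h
      have h3 := congrArg List.length heq
      simp only [List.length_drop, List.length_cons] at h3
      have h4 : (r2.drop (r2.takeWhile (·.isDigit)).length).length ≤ r2.length := by
        simp
      simp only [List.length_cons]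
      omega
    · injection h with h
      subst h
      simp only [List.length_drop, List.length_cons]
      omega
  · rw [if_neg hne] at h
    split at h
    · rename_i r2 heq
      injection h with h
      subst h
      have h4 : (r2.drop (r2.takeWhile (·.isDigit)).length).length ≤ r2.length := by simp
      have h3 := congrArg List.length heq
      simp only [List.length_cons] at h3 ⊢
      omega
    · cases h

-- the re.sub scan: at each position try the pattern; wrap the token if '%' follows,
-- else emit the token (or the single unmatched character) verbatim
def goB : List Char → List Char
  | [] => []
  | c :: r =>
    match hm : matchNum (c :: r) with
    | some p =>
      if p.2.head? = some '%' then
        ('(' :: p.1 ++ ('/' :: '1' :: '0' :: '0' :: ')' :: [])) ++ goB p.2.tail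
      else p.1 ++ goB p.2
    | none => c :: goB r
termination_by s => s.length
decreasing_by
  · have h1 := matchNum_len c r p hm
    have h2 : p.2.tail.length ≤ p.2.length := by simp [List.length_tail]
    simp only [List.length_cons] at h1 ⊢
    omega
  · exact matchNum_len c r p hm
  · simp

def convert_percent_alt (expr : String) : String := String.mk (goB expr.toList)

-- ===== PRECONDITION & SPEC =====
def Spec_convert_percent (expr : String) (out : String) : Prop := out = convert_percent_alt expr
instance (expr : String) (out : String) : Decidable (Spec_convert_percent expr out) := by unfold Spec_convert_percent; infer_instance

-- ===== CLAIM (what is proved, stated in full; the proofs are below) =====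
def Claim_equal_convert_percent : Prop := ∀ (expr : String), Dom_convert_percent expr → Spec_convert_percent expr (convert_percent expr)

-- ===== LEMMAS AND PROOFS =====

theorem isDigit_ne_dot {c : Char} (h : c.isDigit = true) : (c == '.') = false := by
  cases hdec : (c == '.') with
  | false => rfl
  | true =>
    have : c = '.' := eq_of_beq hdec
    subst this
    simp [Char.isDigit] at h

-- drop past the digit run = dropWhile
theorem drop_takeWhile_digits (l : List Char) :
    l.drop (l.takeWhile (·.isDigit)).length = l.dropWhile (·.isDigit) := by
  induction l with
  | nil => simp
  | cons c r ih =>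
    by_cases h : c.isDigit = true
    · simp [List.takeWhile_cons, List.dropWhile_cons, h, ih]
    · simp [List.takeWhile_cons, List.dropWhile_cons, h]

theorem drop_takeWhile_head (l : List Char) (d : Char) (r2 : List Char)
    (h : l.drop (l.takeWhile (·.isDigit)).length = d :: r2) : d.isDigit = false := by
  rw [drop_takeWhile_digits] at h
  have := List.head?_dropWhile_not (p := (·.isDigit)) (l := l)
  rw [h] at this; simpa using this

-- with one dot already seen, A's scanner takes exactly the digit run
theorem readNumA_one (s : List Char) :
    readNumA s 1 = (s.takeWhile (·.isDigit), s.drop (s.takeWhile (·.isDigit)).length) := by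
  induction s with
  | nil => simp [readNumA]
  | cons c r ih =>
    by_cases hd : c.isDigit = true
    · simp [readNumA, hd, isDigit_ne_dot hd, ih, List.takeWhile_cons]
    · by_cases hdot : (c == '.') = true
      · have : c = '.' := eq_of_beq hdot
        subst this
        simp [readNumA, List.takeWhile_cons]
      · simp [readNumA, hd, hdot, List.takeWhile_cons]

-- A's scanner from scratch: first the digit run, then continue after it
theorem readNumA_zero_digits (s : List Char) :
    readNumA s 0 =
      ((s.takeWhile (·.isDigit)) ++ (readNumA (s.drop (s.takeWhile (·.isDigit)).length) 0).1,
       (readNumA (s.drop (s.takeWhile (·.isDigit)).length) 0).2) := by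
  induction s with
  | nil => simp [readNumA]
  | cons c r ih =>
    by_cases hd : c.isDigit = true
    · have hstep : readNumA (c :: r) 0 = ((readNumA r 0).1.cons c, (readNumA r 0).2) := by
        simp [readNumA, hd, isDigit_ne_dot hd]
      rw [hstep, ih]
      simp [List.takeWhile_cons, hd]
    · have htw : (c :: r).takeWhile (·.isDigit) = [] := by
        simp [List.takeWhile_cons, hd]
      simp [htw]

-- the key bridge: wherever A reads a number (head is digit or dot),
-- the regex alternative matches exactly that number token
theorem matchNum_eq_readNumA (c : Char) (r : List Char) (h : (c.isDigit || c == '.') = true) :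
    matchNum (c :: r) = some (readNumA (c :: r) 0) := by
  by_cases hd : c.isDigit = true
  · rw [readNumA_zero_digits (c :: r)]
    have hne : (c :: r).takeWhile (·.isDigit) ≠ [] := by
      simp [List.takeWhile_cons, hd]
    unfold matchNum
    rw [if_pos hne]
    cases hrest : (c :: r).drop (((c :: r).takeWhile (·.isDigit)).length) with
    | nil => simp [readNumA]
    | cons d r2 =>
      by_cases hdot2 : (d == '.') = true
      · have : d = '.' := eq_of_beq hdot2
        subst this
        have hstep : readNumA ('.' :: r2) 0 = ((readNumA r2 1).1.cons '.', (readNumA r2 1).2) := by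
          simp [readNumA]
        rw [hstep, readNumA_one]
        simp
      · have hd2 : d.isDigit = false := drop_takeWhile_head _ _ _ hrest
        have hstep : readNumA (d :: r2) 0 = ([], d :: r2) := by
          simp [readNumA, hd2, hdot2]
        rw [hstep]
        split
        · rename_i r2' heq
          rw [List.cons.injEq] at heq
          rw [heq.1] at hdot2
          simp at hdot2
        · simp
  · have hdot : (c == '.') = true := by
      rcases Bool.or_eq_true_iff.mp h with h1 | h2
      · exact absurd h1 hd
      · exact h2
    have : c = '.' := eq_of_beq hdot
    subst this
    have hstep : readNumA ('.' :: r) 0 = ((readNumA r 1).1.cons '.', (readNumA r 1).2) := by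
      simp [readNumA]
    rw [hstep, readNumA_one]
    unfold matchNum
    rw [if_neg (by simp [List.takeWhile_cons])]
    simp

theorem matchNum_none (c : Char) (r : List Char) (h : (c.isDigit || c == '.') = false) :
    matchNum (c :: r) = none := by
  have hd : c.isDigit = false := by
    cases hx : c.isDigit
    · rfl
    · rw [hx] at h; simp at h
  have hdot : (c == '.') = false := by
    cases hx : (c == '.')
    · rfl
    · rw [hx] at h; simp at h
  unfold matchNum
  rw [if_neg (by simp [List.takeWhile_cons, hd])]
  split
  · rename_i r2 heq
    rw [List.cons.injEq] at heq
    rw [heq.1] at hdot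
    simp at hdot
  · rfl

theorem goA_eq_goB (s : List Char) : goA s = goB s := by
  induction s using goA.induct with
  | case1 => rw [goA, goB]
  | case2 c r h hp ih =>
    rw [goA, goB, matchNum_eq_readNumA c r h]
    simp only [dif_pos h, if_pos hp, ih]
  | case3 c r h hp ih =>
    rw [goA, goB, matchNum_eq_readNumA c r h]
    simp only [dif_pos h, if_neg hp, ih]
  | case4 c r h ih =>
    rw [goA, goB, matchNum_none c r (by simpa using h), dif_neg h, ih]

-- ===== VERDICT (by name: the statement is the Claim_ definition above) =====
theorem convert_percent_spec : Claim_equal_convert_percent := by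
  intro expr _
  unfold Spec_convert_percent convert_percent convert_percent_alt
  rw [goA_eq_goB]
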